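-- pv_equiv track=rewrite | github.com/DailyForkCast/osint-foresight | shared/collectors/commoncrawl_pull.py | extract_page_content
-- ===== SOURCE A (Python) =====
-- from typing import Dict, List, Set, Tuple
--
-- def extract_page_content(warc_content: str) -> Tuple[str, str]:
--     """Extract URL and HTML content from WARC record"""
--
--     # Parse WARC headers
--     lines = warc_content.split('\n')
--     url = ""
--     html_start = 0
--
--     for i, line in enumerate(lines):
--         if line.startswith('WARC-Target-URI:'):
--             url = line.split(':', 1)[1].strip()
--         elif line == '' and i > 0:  # Empty line marks end of headers
--             html_start = i + 1
--             break
--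
--     # Extract HTML content
--     html_content = '\n'.join(lines[html_start:])
--
--     # Find actual HTML start (after HTTP headers)
--     html_marker = html_content.find('<html')
--     if html_marker == -1:
--         html_marker = html_content.find('<!DOCTYPE')
--     if html_marker != -1:
--         html_content = html_content[html_marker:]
--
--     return url, html_content
-- ===== SOURCE B (Python) =====
-- def extract_page_content(warc_content):
--     """Extract URL and HTML content from WARC record"""
--     lines = warc_content.split('\n')
--     # the first blank line strictly after the first line ends the header block
--     try:
--         cut = lines[1:].index('') + 1
--     except ValueError:
--         cut = None
--     header = lines if cut is None else lines[:cut]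
--     url = ""
--     for line in reversed(header):
--         if line.startswith('WARC-Target-URI:'):
--             url = line.split(':', 1)[1].strip()
--             break
--     body = '\n'.join(lines if cut is None else lines[cut + 1:])
--     marker = body.find('<html')
--     if marker == -1:
--         marker = body.find('<!DOCTYPE')
--     if marker != -1:
--         body = body[marker:]
--     return url, body
-- ===== Notes on version B (the rewrite author's own statement) =====
-- stated objective: simpler
-- what changed: B splits the record once, locates the header/body cut with list.index on lines[1:] instead of A's enumerated loop with mutable state and break, scans only the header block in reverse for the last WARC-Target-URI line, and rejoins the remaining lines as the body.
import Mathlib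
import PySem

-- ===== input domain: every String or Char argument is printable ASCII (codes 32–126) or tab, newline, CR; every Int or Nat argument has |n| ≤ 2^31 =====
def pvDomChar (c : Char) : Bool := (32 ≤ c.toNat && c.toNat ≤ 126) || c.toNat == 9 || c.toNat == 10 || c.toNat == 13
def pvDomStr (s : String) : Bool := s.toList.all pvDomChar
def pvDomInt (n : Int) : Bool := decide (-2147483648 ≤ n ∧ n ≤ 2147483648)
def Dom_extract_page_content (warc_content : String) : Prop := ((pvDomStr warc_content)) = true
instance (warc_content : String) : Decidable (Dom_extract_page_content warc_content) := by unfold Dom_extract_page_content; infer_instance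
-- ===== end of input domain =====

-- B replaces A's indexed header loop (mutable url + break) by locating the header/body cut
-- once with list.index and scanning only the header block in reverse for the last URI line:
-- a simpler decomposition, same values (return-value equivalence; neither mutates anything).

-- line.split(':', 1)[1].strip()  — shared by both Pythons verbatim;
-- ':' ≠ "" so split? is some, and [1] exists because the line starts with 'WARC-Target-URI:'
def pvLineVal (line : String) : String :=
  PySem.Str.strip (PySem.List.pyGetD ((PySem.Str.splitMax? line ":" 1).getD []) 1 "")

-- the trailing marker scan, identical in both Pythons:
-- m = body.find('<html'); if -1 then find('<!DOCTYPE'); slice from m if found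
def pvFindHtml (body : String) : String :=
  let m := PySem.Str.find body "<html"
  let m := if m = -1 then PySem.Str.find body "<!DOCTYPE" else m
  if m ≠ -1 then PySem.Str.slice body (some m) none else body

-- ===== PORT A =====
-- the 'for i, line in enumerate(lines)' loop of A: state (url); break returns i+1 as html_start,
-- falling off the end leaves html_start = 0
def pvA_loop : List String → Nat → String → String × Nat
  | [], _, url => (url, 0)
  | line :: rest, i, url =>
    if PySem.Str.startswith line "WARC-Target-URI:" then
      pvA_loop rest (i + 1) (pvLineVal line)
    else if line = "" ∧ 0 < i then (url, i + 1)
    else pvA_loop rest (i + 1) url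

def extract_page_content (warc_content : String) : String × String :=
  let lines := (PySem.Str.split? warc_content "\n").getD []   -- '\n' ≠ "" so split? is some
  let r := pvA_loop lines 0 ""
  -- '\n'.join(lines[html_start:]); html_start : Nat so the slice is List.drop
  let html_content := PySem.Str.join "\n" (lines.drop r.2)
  (r.1, pvFindHtml html_content)

-- ===== PORT B =====
-- 'for line in reversed(header): if line.startswith(...): url = ...; break' with url = "" before
def pvB_firstURI : List String → String
  | [] => ""
  | line :: rest =>
    if PySem.Str.startswith line "WARC-Target-URI:" then pvLineVal line
    else pvB_firstURI rest

def extract_page_content_alt (warc_content : String) : String × String :=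
  let lines := (PySem.Str.split? warc_content "\n").getD []   -- '\n' ≠ "" so split? is some
  -- cut = lines[1:].index('') + 1, None when absent (ValueError caught)
  let cut := (PySem.List.index? (PySem.List.slice lines (some 1) none) "").map (· + 1)
  -- header = lines if cut is None else lines[:cut]; cut : Nat so the slice is List.take
  let header := match cut with | none => lines | some c => lines.take c
  let url := pvB_firstURI header.reverse
  -- body = '\n'.join(lines if cut is None else lines[cut+1:]); the slice is List.drop
  let body := PySem.Str.join "\n"
    (match cut with | none => lines | some c => lines.drop (c + 1))
  (url, pvFindHtml body)

-- ===== PRECONDITION & SPEC =====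
def Spec_extract_page_content (warc_content : String) (out : String × String) : Prop := out = extract_page_content_alt warc_content
instance (warc_content : String) (out : String × String) : Decidable (Spec_extract_page_content warc_content out) := by unfold Spec_extract_page_content; infer_instance

-- ===== CLAIM (what is proved, stated in full; the proofs are below) =====
def Claim_equal_extract_page_content : Prop := ∀ (warc_content : String), Dom_extract_page_content warc_content → Spec_extract_page_content warc_content (extract_page_content warc_content)

-- ===== LEMMAS AND PROOFS =====

-- A's fold through the header lines (last matching line wins)
def pvLastVal (xs : List String) (url : String) : String :=
  xs.foldl (fun u l => if PySem.Str.startswith l "WARC-Target-URI:" then pvLineVal l else u) url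

-- B's reverse scan with explicit default
def pvFirstD (xs : List String) (url : String) : String :=
  match xs with
  | [] => url
  | line :: rest =>
    if PySem.Str.startswith line "WARC-Target-URI:" then pvLineVal line
    else pvFirstD rest url

lemma pvB_firstURI_eq_firstD (xs : List String) : pvB_firstURI xs = pvFirstD xs "" := by
  induction xs with
  | nil => rfl
  | cons l ls ih => simp [pvB_firstURI, pvFirstD, ih]

lemma pvFirstD_append (xs : List String) (x url : String) :
    pvFirstD (xs ++ [x]) url
      = pvFirstD xs (if PySem.Str.startswith x "WARC-Target-URI:" then pvLineVal x else url) := by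
  induction xs with
  | nil => simp [pvFirstD]
  | cons l ls ih => simp [pvFirstD, ih]

lemma pvLastVal_eq_firstD_rev (xs : List String) (url : String) :
    pvLastVal xs url = pvFirstD xs.reverse url := by
  induction xs generalizing url with
  | nil => rfl
  | cons l ls ih =>
    simp only [pvLastVal, List.foldl_cons, List.reverse_cons, pvFirstD_append]
    exact ih _

-- characterisation of A's loop for start index ≥ 1 (past the i = 0 special case)
lemma pvA_loop_spec (ls : List String) : ∀ (i : Nat) (url : String), 1 ≤ i →
    pvA_loop ls i url =
      match PySem.List.index? ls "" with
      | some j => (pvLastVal (ls.take j) url, i + j + 1)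
      | none => (pvLastVal ls url, 0) := by
  induction ls with
  | nil => intro i url _; simp [pvA_loop, PySem.List.index?, pvLastVal]
  | cons l ls ih =>
    intro i url hi
    by_cases hl : l = ""
    · subst hl
      have h0 : 0 < i := hi
      have : pvA_loop ("" :: ls) i url = (url, i + 1) := by
        simp [pvA_loop, h0]
        intro h; exact absurd h (by decide)
      rw [this, PySem.List.index?_cons_self]
      simp [pvLastVal]
    · rw [PySem.List.index?_cons_of_ne ls hl]
      have hstep : pvA_loop (l :: ls) i url
          = pvA_loop ls (i + 1)
              (if PySem.Str.startswith l "WARC-Target-URI:" then pvLineVal l else url) := by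
        cases hp : PySem.Str.startswith l "WARC-Target-URI:" <;>
          simp only [pvA_loop, hp] <;> simp [hl]
      rw [hstep, ih (i + 1) _ (by omega)]
      cases hidx : PySem.List.index? ls "" with
      | none => simp [pvLastVal]
      | some j =>
        simp only [Option.map_some]
        simp [pvLastVal]
        omega

-- ===== VERDICT (by name: the statement is the Claim_ definition above) =====
theorem extract_page_content_spec : Claim_equal_extract_page_content := by
  intro s _
  unfold Spec_extract_page_content extract_page_content extract_page_content_alt
  simp only [PySem.List.slice_from_one]
  generalize ((PySem.Str.split? s "\n").getD []) = lines
  cases lines with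
  | nil => rfl
  | cons l0 rest =>
    have hstep : pvA_loop (l0 :: rest) 0 ""
        = pvA_loop rest 1
            (if PySem.Str.startswith l0 "WARC-Target-URI:" then pvLineVal l0 else "") := by
      cases hp : PySem.Str.startswith l0 "WARC-Target-URI:" <;>
        simp only [pvA_loop, hp] <;> simp
    rw [hstep, pvA_loop_spec rest 1 _ (by omega)]
    simp only [List.tail_cons]
    cases hidx : PySem.List.index? rest "" with
    | none =>
      simp only [Option.map_none]
      rw [pvB_firstURI_eq_firstD, ← pvLastVal_eq_firstD_rev]
      simp [pvLastVal]
    | some j =>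
      simp only [Option.map_some]
      rw [pvB_firstURI_eq_firstD, ← pvLastVal_eq_firstD_rev]
      simp [pvLastVal, List.take_succ_cons, List.drop_succ_cons, Nat.add_comm 1 j]
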